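-- pv_equiv track=rewrite | github.com/JaeYaNe/practice_codingTest | pg_70129.py | solution
-- ===== SOURCE A (Python) =====
-- def solution(s):
--     zero_cnt = 0
--     turn_cnt = 0
--
--     while s != "1":
--         turn_cnt += 1
--         zeros = s.count("0")
--         zero_cnt += zeros
--
--         s = bin(s.count("1"))[2:]
--
--     return [turn_cnt, zero_cnt]
-- ===== SOURCE B (Python) =====
-- def solution(s):
--     # Dynamic-programming tabulation: build popcount/bit-length/turn/zero tables
--     # bottom-up for every value up to the initial ones-count, instead of
--     # following the popcount chain step by step on binary strings.
--     if s == "1":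
--         return [0, 0]
--     ones = s.count("1")
--     size = ones + 1
--     pc = [0] * size
--     bl = [0] * size
--     t = [0] * size
--     z = [0] * size
--     for k in range(1, size):
--         pc[k] = pc[k >> 1] + (k & 1)
--         bl[k] = bl[k >> 1] + 1
--     for k in range(2, size):
--         t[k] = t[pc[k]] + 1
--         z[k] = z[pc[k]] + bl[k] - pc[k]
--     return [1 + t[ones], s.count("0") + z[ones]]
-- ===== Notes on version B (the rewrite author's own statement) =====
-- stated objective: alternative
-- what changed: B replaces A's step-by-step popcount chain on binary strings by a bottom-up dynamic-programming tabulation: it fills popcount, bit-length, turn-count and zero-count tables for every integer up to the initial ones-count and reads the answer off the tables.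
-- outside the precondition, e.g. on solution('0'): A does not finish within the time limit, B returns [1, 1]
import Mathlib
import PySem

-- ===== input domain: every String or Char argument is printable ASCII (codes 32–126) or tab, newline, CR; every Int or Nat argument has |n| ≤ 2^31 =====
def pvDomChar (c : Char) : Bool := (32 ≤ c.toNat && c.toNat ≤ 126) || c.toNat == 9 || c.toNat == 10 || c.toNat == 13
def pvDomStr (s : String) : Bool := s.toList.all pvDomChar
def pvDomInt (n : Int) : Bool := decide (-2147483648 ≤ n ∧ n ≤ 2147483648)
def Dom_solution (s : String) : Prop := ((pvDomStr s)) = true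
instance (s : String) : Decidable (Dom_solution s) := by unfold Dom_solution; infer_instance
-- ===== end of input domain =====

-- B replaces A's step-by-step popcount chain on binary strings by a bottom-up dynamic-programming
-- tabulation of popcount/bit-length/turn/zero values for every integer up to the initial ones-count
-- (objective: alternative; not claimed faster).

-- ===== PORT A =====
-- A's while-loop, fuelled: when s contains no '1' (and s ≠ "1") the Python loop never
-- terminates (s becomes "0" forever); Pre_solution excludes exactly those inputs, and on
-- every input satisfying Pre_solution the fuel (count of '1' + 2) is never exhausted.
def solutionLoopA : Nat → String → Int → Int → List Int
  | 0, _, turn_cnt, zero_cnt => [turn_cnt, zero_cnt]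
  | fuel+1, s, turn_cnt, zero_cnt =>
    if s = "1" then [turn_cnt, zero_cnt]
    else
      -- turn_cnt += 1; zeros = s.count("0"); zero_cnt += zeros; s = bin(s.count("1"))[2:]
      let zeros : Nat := PySem.Str.count s "0"
      solutionLoopA fuel
        (PySem.Str.slice (PySem.Int.pyBin ((PySem.Str.count s "1" : Nat) : Int)) (some 2) none)
        (turn_cnt + 1) (zero_cnt + (zeros : Int))

def solution (s : String) : List Int := solutionLoopA (PySem.Str.count s "1" + 2) s 0 0

-- ===== PORT B =====
-- for k in range(1, size): pc[k] = pc[k >> 1] + (k & 1); bl[k] = bl[k >> 1] + 1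
-- (list indices are always in range here — k < size = length, k >>> 1 < k — so the
--  in-range read is transcribed as getD _ 0; the loop is the obvious recursion on k)
def fillPB (size : Nat) (k : Nat) (pc bl : List Int) : List Int × List Int :=
  if _h : k < size then
    fillPB size (k+1)
      (pc.set k (pc.getD (k >>> 1) 0 + ((k % 2 : Nat) : Int)))
      (bl.set k (bl.getD (k >>> 1) 0 + 1))
  else (pc, bl)
termination_by size - k

-- for k in range(2, size): t[k] = t[pc[k]] + 1; z[k] = z[pc[k]] + bl[k] - pc[k]
-- (pc[k] is a nonnegative in-range index, read back as .toNat of the stored Int)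
def fillTZ (size : Nat) (pc bl : List Int) (k : Nat) (t z : List Int) : List Int × List Int :=
  if _h : k < size then
    let p : Nat := (pc.getD k 0).toNat
    fillTZ size pc bl (k+1)
      (t.set k (t.getD p 0 + 1))
      (z.set k (z.getD p 0 + bl.getD k 0 - pc.getD k 0))
  else (t, z)
termination_by size - k

def solution_alt (s : String) : List Int :=
  if s = "1" then [0, 0]
  else
    let ones : Nat := PySem.Str.count s "1"
    let size : Nat := ones + 1
    let pcbl := fillPB size 1 (List.replicate size 0) (List.replicate size 0)
    let tz := fillTZ size pcbl.1 pcbl.2 2 (List.replicate size 0) (List.replicate size 0)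
    [1 + tz.1.getD ones 0, ((PySem.Str.count s "0" : Nat) : Int) + tz.2.getD ones 0]

-- ===== PRECONDITION & SPEC =====
-- Pre_ excludes strings containing no '1' character: there (unless s == "1") Python A loops
-- forever (s becomes "0" and bin(0)[2:] == "0" again), so A never returns.
def Pre_solution (s : String) : Prop := 1 ≤ PySem.Str.count s "1"
instance (s : String) : Decidable (Pre_solution s) := by unfold Pre_solution; infer_instance
def pvWitness_solution : String := ("1101")
def Spec_solution (s : String) (out : List Int) : Prop := out = solution_alt s
instance (s : String) (out : List Int) : Decidable (Spec_solution s out) := by unfold Spec_solution; infer_instance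

-- ===== CLAIM (what is proved, stated in full; the proofs are below) =====
def Claim_equal_solution : Prop := ∀ (s : String), Dom_solution s → Pre_solution s → Spec_solution s (solution s)

-- ===== LEMMAS AND PROOFS =====

-- ---- string-counting bridge lemmas ----
theorem chars_count_go_singleton (c : Char) :
    ∀ (l : List Char) (fuel acc : Nat), l.length ≤ fuel →
      PySem.Chars.count.go [c] fuel l acc = acc + l.count c := by
  intro l
  induction l with
  | nil =>
    intro fuel acc _
    cases fuel <;> simp [PySem.Chars.count.go]
  | cons hd t ih =>
    intro fuel acc hf
    cases fuel with
    | zero => simp at hf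
    | succ f =>
      simp only [PySem.Chars.count.go]
      by_cases hc : c = hd
      · have hp : [c].isPrefixOf (hd :: t) = true := by simp [List.isPrefixOf, hc]
        rw [if_pos hp]
        simp only [List.length_cons, List.length_nil, List.drop_succ_cons, List.drop_zero]
        rw [ih f (acc+1) (by simpa using hf)]
        simp [hc]
        omega
      · have hp : [c].isPrefixOf (hd :: t) = false := by simp [List.isPrefixOf, hc]
        rw [if_neg (by simp [hp])]
        rw [ih f acc (by simpa using hf)]
        simp [Ne.symm hc]

theorem chars_count_singleton (l : List Char) (c : Char) :
    PySem.Chars.count l [c] = l.count c := by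
  simp [PySem.Chars.count, chars_count_go_singleton c l l.length 0 le_rfl]

theorem str_count_zero (s : String) : PySem.Str.count s "0" = s.toList.count '0' := by
  rw [PySem.Str.count_eq]
  have h1 : ("0" : String).toList = ['0'] := by decide
  rw [h1, chars_count_singleton]

theorem str_count_one (s : String) : PySem.Str.count s "1" = s.toList.count '1' := by
  rw [PySem.Str.count_eq]
  have h1 : ("1" : String).toList = ['1'] := by decide
  rw [h1, chars_count_singleton]

-- ---- bin(n)[2:] characterisation ----
theorem tdc_acc : ∀ (f n : Nat) (acc : List Char),
    Nat.toDigitsCore 2 f n acc = Nat.toDigitsCore 2 f n [] ++ acc := by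
  intro f
  induction f with
  | zero => intro n acc; simp [Nat.toDigitsCore]
  | succ f ih =>
    intro n acc
    simp only [Nat.toDigitsCore]
    by_cases h : n / 2 = 0
    · simp [h]
    · rw [if_neg h, if_neg h, ih (n/2) ((n % 2).digitChar :: acc), ih (n/2) [(n % 2).digitChar]]
      simp

theorem tdc_fuel : ∀ (n f₁ f₂ : Nat), n < f₁ → n < f₂ →
    Nat.toDigitsCore 2 f₁ n [] = Nat.toDigitsCore 2 f₂ n [] := by
  intro n
  induction n using Nat.strong_induction_on with
  | _ n ih =>
    intro f₁ f₂ h₁ h₂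
    cases f₁ with
    | zero => omega
    | succ a =>
      cases f₂ with
      | zero => omega
      | succ b =>
        simp only [Nat.toDigitsCore]
        by_cases h : n / 2 = 0
        · simp [h]
        · rw [if_neg h, if_neg h, tdc_acc a, tdc_acc b,
            ih (n/2) (by omega) a b (by omega) (by omega)]

theorem toDigits_two_step (n : Nat) (h : 2 ≤ n) :
    Nat.toDigits 2 n = Nat.toDigits 2 (n / 2) ++ [Nat.digitChar (n % 2)] := by
  have h2 : n / 2 ≠ 0 := by omega
  simp only [Nat.toDigits]
  conv_lhs => simp only [Nat.toDigitsCore]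
  rw [if_neg h2, tdc_acc n (n/2) [(n % 2).digitChar],
    tdc_fuel (n/2) n (n/2+1) (by omega) (by omega)]

theorem count1_toDigits : ∀ (n : Nat), 1 ≤ n →
    (Nat.toDigits 2 n).count '1' = PySem.Int.bitCount (n : Int) := by
  intro n
  induction n using Nat.strong_induction_on with
  | _ n ih =>
    intro h1
    by_cases h2 : n = 1
    · subst h2; decide
    · have hn : 2 ≤ n := by omega
      rw [toDigits_two_step n hn, List.count_append,
        ih (n/2) (by omega) (by omega),
        PySem.Int.bitCount_natCast (by omega : 0 < n)]
      have hm : n % 2 = 0 ∨ n % 2 = 1 := by omega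
      rcases hm with h | h <;> rw [h]
      · have : List.count '1' [Nat.digitChar 0] = 0 := by decide
        omega
      · have : List.count '1' [Nat.digitChar 1] = 1 := by decide
        omega

theorem len_toDigits : ∀ (n : Nat), 1 ≤ n →
    (Nat.toDigits 2 n).length = PySem.Int.bitLength (n : Int) := by
  intro n
  induction n using Nat.strong_induction_on with
  | _ n ih =>
    intro h1
    by_cases h2 : n = 1
    · subst h2; decide
    · have hn : 2 ≤ n := by omega
      rw [toDigits_two_step n hn, List.length_append,
        ih (n/2) (by omega) (by omega),
        PySem.Int.bitLength_natCast (by omega : 0 < n)]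
      simp

theorem count01_toDigits : ∀ (n : Nat), 1 ≤ n →
    (Nat.toDigits 2 n).count '0' + (Nat.toDigits 2 n).count '1' = (Nat.toDigits 2 n).length := by
  intro n
  induction n using Nat.strong_induction_on with
  | _ n ih =>
    intro h1
    by_cases h2 : n = 1
    · subst h2; decide
    · have hn : 2 ≤ n := by omega
      rw [toDigits_two_step n hn, List.count_append, List.count_append, List.length_append]
      have hm : n % 2 = 0 ∨ n % 2 = 1 := by omega
      have hrec := ih (n/2) (by omega) (by omega)
      rcases hm with h | h <;> rw [h]
      · have h0 : List.count '0' [Nat.digitChar 0] = 1 := by decide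
        have h1' : List.count '1' [Nat.digitChar 0] = 0 := by decide
        simp only [h0, h1', List.length_cons, List.length_nil]
        omega
      · have h0 : List.count '0' [Nat.digitChar 1] = 0 := by decide
        have h1' : List.count '1' [Nat.digitChar 1] = 1 := by decide
        simp only [h0, h1', List.length_cons, List.length_nil]
        omega

-- ---- popcount / bit-length arithmetic ----
theorem bitLength_pos (n : Nat) (h : 1 ≤ n) : 1 ≤ PySem.Int.bitLength (n : Int) := by
  rw [PySem.Int.bitLength_natCast (by omega)]
  omega

theorem bitCount_le_self : ∀ (n : Nat), PySem.Int.bitCount (n : Int) ≤ n := by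
  intro n
  induction n using Nat.strong_induction_on with
  | _ n ih =>
    by_cases h : n = 0
    · subst h; decide
    · rw [PySem.Int.bitCount_natCast (by omega)]
      have := ih (n/2) (by omega)
      omega

theorem bitCount_lt_self (n : Nat) (h : 2 ≤ n) : PySem.Int.bitCount (n : Int) < n := by
  rw [PySem.Int.bitCount_natCast (by omega)]
  have := bitCount_le_self (n/2)
  omega

theorem bitCount_pos : ∀ (n : Nat), 1 ≤ n → 1 ≤ PySem.Int.bitCount (n : Int) := by
  intro n
  induction n using Nat.strong_induction_on with
  | _ n ih =>
    intro h1
    by_cases h2 : n = 1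
    · subst h2; decide
    · rw [PySem.Int.bitCount_natCast (by omega)]
      have := ih (n/2) (by omega) (by omega)
      omega

theorem bitCount_le_bitLength' : ∀ (n : Nat),
    PySem.Int.bitCount (n : Int) ≤ PySem.Int.bitLength (n : Int) := by
  intro n
  induction n using Nat.strong_induction_on with
  | _ n ih =>
    by_cases h : n = 0
    · subst h; decide
    · rw [PySem.Int.bitCount_natCast (by omega), PySem.Int.bitLength_natCast (by omega)]
      have := ih (n/2) (by omega)
      omega

-- ---- the popcount chain (ghost functions for the proof) ----
def pcN (n : Nat) : Nat := PySem.Int.bitCount (n : Int)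
def blN (n : Nat) : Nat := PySem.Int.bitLength (n : Int)

theorem pcN_lt (n : Nat) (h : 2 ≤ n) : pcN n < n := bitCount_lt_self n h
theorem pcN_pos (n : Nat) (h : 1 ≤ n) : 1 ≤ pcN n := bitCount_pos n h
theorem pcN_le_blN (n : Nat) : pcN n ≤ blN n := bitCount_le_bitLength' n

def chainT (n : Nat) : Nat :=
  if h : n ≤ 1 then 0 else chainT (pcN n) + 1
termination_by n
decreasing_by exact pcN_lt n (by omega)

def chainZ (n : Nat) : Nat :=
  if h : n ≤ 1 then 0 else chainZ (pcN n) + (blN n - pcN n)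
termination_by n
decreasing_by exact pcN_lt n (by omega)

-- ---- bin(count)[2:] facts ----
theorem bstr_toList (n : Nat) :
    (PySem.Str.slice (PySem.Int.pyBin (n : Int)) (some 2) none).toList = Nat.toDigits 2 n := by
  rw [PySem.Str.toList_slice, PySem.Int.toList_pyBin, PySem.Chars.slice_eq_listSlice,
    PySem.List.slice_from _ (by omega : (0:Int) ≤ 2)]
  simp only [PySem.Int.toBinChars0b]
  rw [if_neg (by omega : ¬ ((n : Int) < 0))]
  simp

theorem bstr_eq_one_iff (n : Nat) (h : 1 ≤ n) :
    (PySem.Str.slice (PySem.Int.pyBin (n : Int)) (some 2) none) = "1" ↔ n = 1 := by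
  rw [← String.toList_inj, bstr_toList]
  constructor
  · intro hl
    by_contra hne
    have hn : 2 ≤ n := by omega
    have hlen : (Nat.toDigits 2 n).length = PySem.Int.bitLength (n : Int) := len_toDigits n h
    have h2 : 2 ≤ PySem.Int.bitLength (n : Int) := by
      rw [PySem.Int.bitLength_natCast (by omega)]
      have := bitLength_pos (n/2) (by omega)
      omega
    have : (Nat.toDigits 2 n).length = (("1" : String).toList).length := by rw [hl]
    simp at this
    omega
  · intro hl; subst hl; decide

theorem count0_bstr (n : Nat) (h : 1 ≤ n) :
    ((PySem.Str.count (PySem.Str.slice (PySem.Int.pyBin (n : Int)) (some 2) none) "0" : Nat) : Int)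
      = ((blN n : Nat) : Int) - ((pcN n : Nat) : Int) := by
  rw [str_count_zero, bstr_toList]
  have h01 := count01_toDigits n h
  have h1 := count1_toDigits n h
  have hl := len_toDigits n h
  unfold blN pcN
  omega

theorem count1_bstr (n : Nat) (h : 1 ≤ n) :
    PySem.Str.count (PySem.Str.slice (PySem.Int.pyBin (n : Int)) (some 2) none) "1" = pcN n := by
  rw [str_count_one, bstr_toList, count1_toDigits n h]; rfl

-- ---- A's loop computes the chain ----
theorem loopA_chain : ∀ (n : Nat), 1 ≤ n → ∀ (f : Nat) (t z : Int), n ≤ f →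
    solutionLoopA f (PySem.Str.slice (PySem.Int.pyBin (n : Int)) (some 2) none) t z
      = [t + (chainT n : Int), z + (chainZ n : Int)] := by
  intro n
  induction n using Nat.strong_induction_on with
  | _ n ih =>
    intro h1 f t z hf
    cases f with
    | zero => omega
    | succ a =>
      simp only [solutionLoopA]
      by_cases h2 : n = 1
      · subst h2
        rw [if_pos ((bstr_eq_one_iff 1 le_rfl).mpr rfl)]
        rw [show chainT 1 = 0 from by unfold chainT; simp,
            show chainZ 1 = 0 from by unfold chainZ; simp]
        simp
      · have hn : 2 ≤ n := by omega
        rw [if_neg (by rw [bstr_eq_one_iff n h1]; exact h2)]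
        rw [count1_bstr n h1]
        have hrec := ih (pcN n) (pcN_lt n hn) (pcN_pos n h1) a (t+1)
          (z + ((PySem.Str.count (PySem.Str.slice (PySem.Int.pyBin (n : Int)) (some 2) none) "0" : Nat) : Int))
          (by have := pcN_lt n hn; omega)
        rw [hrec, count0_bstr n h1]
        rw [show chainT n = chainT (pcN n) + 1 from by conv_lhs => unfold chainT; simp [Nat.not_le.mpr (by omega : 1 < n)],
            show chainZ n = chainZ (pcN n) + (blN n - pcN n) from by conv_lhs => unfold chainZ; simp [Nat.not_le.mpr (by omega : 1 < n)]]
        have hle := pcN_le_blN n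
        push_cast [hle]
        simp only [List.cons.injEq, and_true]
        exact ⟨by ring, by ring⟩

-- ---- getD/set bookkeeping ----
theorem getD_set_eq (l : List Int) (i : Nat) (v : Int) (h : i < l.length) :
    (l.set i v).getD i 0 = v := by
  unfold List.getD
  rw [List.getElem?_set_self' ]
  simp [h]

theorem getD_set_ne (l : List Int) (i j : Nat) (v : Int) (h : j ≠ i) :
    (l.set i v).getD j 0 = l.getD j 0 := by
  unfold List.getD
  rw [List.getElem?_set_ne (by omega)]

theorem getD_replicate (n j : Nat) : (List.replicate n (0:Int)).getD j 0 = 0 := by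
  unfold List.getD
  by_cases h : j < n
  · rw [List.getElem?_replicate_of_lt h]; rfl
  · rw [List.getElem?_eq_none (by simpa using h)]; rfl

-- ---- table invariants ----
theorem fillPB_spec (size : Nat) : ∀ (d k : Nat), size ≤ k + d → ∀ (pc bl : List Int),
    pc.length = size → bl.length = size → 1 ≤ k →
    (∀ j, j < k → j < size → pc.getD j 0 = ((pcN j : Nat) : Int)) →
    (∀ j, j < k → j < size → bl.getD j 0 = ((blN j : Nat) : Int)) →
    ∀ j, j < size →
      (fillPB size k pc bl).1.getD j 0 = ((pcN j : Nat) : Int) ∧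
      (fillPB size k pc bl).2.getD j 0 = ((blN j : Nat) : Int) := by
  intro d
  induction d with
  | zero =>
    intro k hd pc bl hlp hlb hk hpc hbl j hj
    rw [fillPB, dif_neg (by omega)]
    exact ⟨hpc j (by omega) hj, hbl j (by omega) hj⟩
  | succ d ihd =>
    intro k hd pc bl hlp hlb hk hpc hbl j hj
    by_cases h : k < size
    · rw [fillPB, dif_pos h]
      have hhalf : k >>> 1 = k / 2 := Nat.shiftRight_one k ▸ rfl
      have hlt : k / 2 < k := by omega
      have hpc2 : pc.getD (k >>> 1) 0 = ((pcN (k/2) : Nat) : Int) := by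
        rw [hhalf]; exact hpc (k/2) hlt (by omega)
      have hbl2 : bl.getD (k >>> 1) 0 = ((blN (k/2) : Nat) : Int) := by
        rw [hhalf]; exact hbl (k/2) hlt (by omega)
      refine ihd (k+1) (by omega) _ _ (by simp [hlp]) (by simp [hlb]) (by omega) ?_ ?_ j hj
      · intro j' hj' hj's
        by_cases he : j' = k
        · subst he
          rw [getD_set_eq _ _ _ (by omega), hpc2]
          rw [show pcN j' = j' % 2 + pcN (j'/2) from PySem.Int.bitCount_natCast (by omega)]
          push_cast; ring
        · rw [getD_set_ne _ _ _ _ he]; exact hpc j' (by omega) hj's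
      · intro j' hj' hj's
        by_cases he : j' = k
        · subst he
          rw [getD_set_eq _ _ _ (by omega), hbl2]
          rw [show blN j' = blN (j'/2) + 1 from PySem.Int.bitLength_natCast (by omega)]
          push_cast; ring
        · rw [getD_set_ne _ _ _ _ he]; exact hbl j' (by omega) hj's
    · rw [fillPB, dif_neg h]
      exact ⟨hpc j (by omega) hj, hbl j (by omega) hj⟩

theorem fillTZ_spec (size : Nat) (pc bl : List Int)
    (hpc : ∀ j, j < size → pc.getD j 0 = ((pcN j : Nat) : Int))
    (hbl : ∀ j, j < size → bl.getD j 0 = ((blN j : Nat) : Int)) :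
    ∀ (d k : Nat), size ≤ k + d → ∀ (t z : List Int),
    t.length = size → z.length = size → 2 ≤ k →
    (∀ j, j < k → j < size → t.getD j 0 = ((chainT j : Nat) : Int)) →
    (∀ j, j < k → j < size → z.getD j 0 = ((chainZ j : Nat) : Int)) →
    ∀ j, j < size →
      (fillTZ size pc bl k t z).1.getD j 0 = ((chainT j : Nat) : Int) ∧
      (fillTZ size pc bl k t z).2.getD j 0 = ((chainZ j : Nat) : Int) := by
  intro d
  induction d with
  | zero =>
    intro k hd t z hlt hlz hk ht hz j hj
    rw [fillTZ, dif_neg (by omega)]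
    exact ⟨ht j (by omega) hj, hz j (by omega) hj⟩
  | succ d ihd =>
    intro k hd t z hlt hlz hk ht hz j hj
    by_cases h : k < size
    · rw [fillTZ, dif_pos h]
      have hpck : pc.getD k 0 = ((pcN k : Nat) : Int) := hpc k h
      have hp : (pc.getD k 0).toNat = pcN k := by rw [hpck]; simp
      have hplt : pcN k < k := pcN_lt k (by omega)
      have hppos : 1 ≤ pcN k := pcN_pos k (by omega)
      have htp : t.getD (pc.getD k 0).toNat 0 = ((chainT (pcN k) : Nat) : Int) := by
        rw [hp]; exact ht (pcN k) (by omega) (by omega)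
      have hzp : z.getD (pc.getD k 0).toNat 0 = ((chainZ (pcN k) : Nat) : Int) := by
        rw [hp]; exact hz (pcN k) (by omega) (by omega)
      refine ihd (k+1) (by omega) _ _ (by simp [hlt]) (by simp [hlz]) (by omega) ?_ ?_ j hj
      · intro j' hj' hj's
        by_cases he : j' = k
        · subst he
          rw [getD_set_eq _ _ _ (by omega), htp]
          rw [show chainT j' = chainT (pcN j') + 1 from by
            conv_lhs => unfold chainT
            simp [Nat.not_le.mpr (by omega : 1 < j')]]
          push_cast; ring
        · rw [getD_set_ne _ _ _ _ he]; exact ht j' (by omega) hj's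
      · intro j' hj' hj's
        by_cases he : j' = k
        · subst he
          rw [getD_set_eq _ _ _ (by omega), hzp, hbl j' hj's, hpck]
          rw [show chainZ j' = chainZ (pcN j') + (blN j' - pcN j') from by
            conv_lhs => unfold chainZ
            simp [Nat.not_le.mpr (by omega : 1 < j')]]
          have hle := pcN_le_blN j'
          push_cast; omega
        · rw [getD_set_ne _ _ _ _ he]; exact hz j' (by omega) hj's
    · rw [fillTZ, dif_neg h]
      exact ⟨ht j (by omega) hj, hz j (by omega) hj⟩

theorem loopA_succ (f : Nat) (s : String) (t z : Int) :
    solutionLoopA (f+1) s t z = if s = "1" then [t, z]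
      else solutionLoopA f
        (PySem.Str.slice (PySem.Int.pyBin ((PySem.Str.count s "1" : Nat) : Int)) (some 2) none)
        (t + 1) (z + ((PySem.Str.count s "0" : Nat) : Int)) := rfl

-- ===== VERDICT (by name: the statement is the Claim_ definition above) =====
theorem solution_spec : Claim_equal_solution := by
  intro s _ hpre
  unfold Spec_solution solution solution_alt
  by_cases hs : s = "1"
  · subst hs
    rw [if_pos rfl]
    have h1 : PySem.Str.count "1" "1" = 1 := by
      rw [str_count_one]; decide
    rw [h1, show (1:Nat)+2 = 2+1 from rfl, loopA_succ, if_pos rfl]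
  · rw [if_neg hs]
    have hc : 1 ≤ PySem.Str.count s "1" := hpre
    set n := PySem.Str.count s "1" with hn
    show solutionLoopA (n + 2) s 0 0 =
      [1 + (fillTZ (n+1) (fillPB (n+1) 1 (List.replicate (n+1) 0) (List.replicate (n+1) 0)).1
             (fillPB (n+1) 1 (List.replicate (n+1) 0) (List.replicate (n+1) 0)).2
             2 (List.replicate (n+1) 0) (List.replicate (n+1) 0)).1.getD n 0,
       ((PySem.Str.count s "0" : Nat) : Int) +
        (fillTZ (n+1) (fillPB (n+1) 1 (List.replicate (n+1) 0) (List.replicate (n+1) 0)).1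
             (fillPB (n+1) 1 (List.replicate (n+1) 0) (List.replicate (n+1) 0)).2
             2 (List.replicate (n+1) 0) (List.replicate (n+1) 0)).2.getD n 0]
    have hrepl : (List.replicate (n+1) (0:Int)).length = n+1 := by simp
    have hPB := fillPB_spec (n+1) (n+1) 1 (by omega) _ _ hrepl hrepl le_rfl
      (by intro j hj hjs; interval_cases j; rw [getD_replicate]; decide)
      (by intro j hj hjs; interval_cases j; rw [getD_replicate]; decide)
    have hTZ := fillTZ_spec (n+1) _ _ (fun j hj => (hPB j hj).1) (fun j hj => (hPB j hj).2)
      (n+1) 2 (by omega) _ _ hrepl hrepl le_rfl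
      (by intro j hj hjs
          rw [getD_replicate]
          interval_cases j
          · rw [show chainT 0 = 0 from by unfold chainT; simp]; rfl
          · rw [show chainT 1 = 0 from by unfold chainT; simp]; rfl)
      (by intro j hj hjs
          rw [getD_replicate]
          interval_cases j
          · rw [show chainZ 0 = 0 from by unfold chainZ; simp]; rfl
          · rw [show chainZ 1 = 0 from by unfold chainZ; simp]; rfl)
    obtain ⟨htn, hzn⟩ := hTZ n (by omega)
    rw [htn, hzn, show n + 2 = (n+1)+1 from rfl, loopA_succ, if_neg hs, ← hn,
        loopA_chain n hc (n+1) (0+1) (0 + ((PySem.Str.count s "0" : Nat) : Int)) (by omega)]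
    norm_num
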